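-- pv_equiv track=rewrite | github.com/zmaychek84/vaip | vaip/python/voe/passes/op_fusion_index.py | sort_large_pattern_first
-- ===== SOURCE A (Python) =====
-- def sort_large_pattern_first(patterns_dict):
--     len_dict = {}
--     for key in patterns_dict.keys():
--         if len(patterns_dict[key]) > 1:
--             patterns_dict[key] = sorted(patterns_dict[key], key=len, reverse=True)
--         len_dict[key] = len(patterns_dict[key][0])
--     len_dict = dict(sorted(len_dict.items(), key=lambda item: item[1], reverse=True))
--     new_dict = {}
--     for key in len_dict.keys():
--         new_dict[key] = patterns_dict[key]
--     # breakpoint()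
--     return new_dict
-- ===== SOURCE B (Python) =====
-- def sort_large_pattern_first(patterns_dict):
--     # Bucket (group-by) approach: no comparison sort of the items; group by length
--     # and emit buckets in descending length order (only the distinct lengths get sorted).
--     def by_len_desc(seq):
--         buckets = {}
--         for x in seq:
--             buckets.setdefault(len(x), []).append(x)
--         out = []
--         for n in sorted(buckets, reverse=True):
--             out.extend(buckets[n])
--         return out
--
--     buckets = {}
--     for key, pats in patterns_dict.items():
--         if len(pats) > 1:
--             pats = by_len_desc(pats)
--         buckets.setdefault(len(pats[0]), []).append((key, pats))
--     result = {}
--     for n in sorted(buckets, reverse=True):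
--         for key, pats in buckets[n]:
--             result[key] = pats
--     return result
-- ===== Notes on version B (the rewrite author's own statement) =====
-- stated objective: alternative
-- what changed: B replaces both of A's comparison sorts by a group-by/bucket strategy: it groups pattern lists (and then the key/value items) into a dict of buckets keyed by length, and emits the buckets in descending order of the distinct lengths, relying on bucket insertion order for stability, instead of A's sorted() over the full lists plus an auxiliary key->length table and a rebuild loop; B also does not mutate its argument (A reassigns sorted sublists in place), so the equivalence is about the return value.
import Mathlib
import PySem

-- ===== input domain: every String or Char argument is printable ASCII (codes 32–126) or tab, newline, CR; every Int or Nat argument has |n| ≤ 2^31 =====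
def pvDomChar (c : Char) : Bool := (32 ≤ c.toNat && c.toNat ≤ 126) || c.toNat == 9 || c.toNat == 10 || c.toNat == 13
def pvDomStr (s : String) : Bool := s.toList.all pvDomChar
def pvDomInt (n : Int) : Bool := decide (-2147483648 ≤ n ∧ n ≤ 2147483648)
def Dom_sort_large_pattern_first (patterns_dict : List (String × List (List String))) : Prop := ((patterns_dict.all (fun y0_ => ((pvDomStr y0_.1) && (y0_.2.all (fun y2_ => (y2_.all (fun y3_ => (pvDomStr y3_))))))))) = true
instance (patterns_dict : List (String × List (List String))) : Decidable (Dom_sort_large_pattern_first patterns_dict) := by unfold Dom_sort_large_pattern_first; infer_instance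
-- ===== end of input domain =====

-- B replaces A's two comparison sorts and auxiliary length table by a group-by/bucket strategy
-- (buckets keyed by length, emitted in descending order of the distinct lengths) — objective:
-- alternative. A mutates its argument in place (reassigns sorted sublists); B does not, so the
-- equivalence proved here is about the RETURN value.

-- ===== PORT A =====
def sort_large_pattern_first (patterns_dict : List (String × List (List String))) : List (String × List (List String)) :=
  let d0 : PySem.Dict String (List (List String)) := PySem.Dict.mk patterns_dict
  -- for key in patterns_dict.keys(): … (keys are never added or removed inside the loop)
  let st :=
    List.foldl
      (fun (st : PySem.Dict String (List (List String)) × PySem.Dict String Int) key =>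
        let d := st.1
        let ld := st.2
        -- key comes from .keys(), so patterns_dict[key] cannot raise KeyError: getD with a dummy default is exact here
        let d := if 1 < (d.getD key []).length
                 then d.insert key (PySem.List.sorted (d.getD key []) (fun p => (p.length : Int)) true)
                 else d
        -- patterns_dict[key][0]: IndexError when the value is the empty list — excluded by Pre_
        (d, ld.insert key ((((PySem.List.pyGet? (d.getD key []) 0).getD []).length : Int))))
      (d0, PySem.Dict.empty)
      d0.keys
  -- len_dict = dict(sorted(len_dict.items(), key=lambda item: item[1], reverse=True))
  let len_dict : PySem.Dict String Int :=
    PySem.Dict.ofList (PySem.List.sorted st.2.items (fun it => it.2) true)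
  -- new_dict = {}; for key in len_dict.keys(): new_dict[key] = patterns_dict[key]
  let new_dict :=
    List.foldl (fun nd key => nd.insert key (st.1.getD key []))
      (PySem.Dict.empty : PySem.Dict String (List (List String))) len_dict.keys
  new_dict.items

-- ===== PORT B =====
-- def by_len_desc(seq): bucket the elements by len, emit buckets for the distinct lens descending
def pvByLenDesc (seq : List (List String)) : List (List String) :=
  let buckets := seq.foldl
    (fun d x => d.modify ((x.length : Int)) [] (fun l => l ++ [x]))   -- buckets.setdefault(len(x), []).append(x)
    (PySem.Dict.empty : PySem.Dict Int (List (List String)))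
  List.foldl (fun out n => out ++ buckets.getD n []) []
    (PySem.List.sorted buckets.keys (fun x => x) true)                -- for n in sorted(buckets, reverse=True)

def sort_large_pattern_first_alt (patterns_dict : List (String × List (List String))) : List (String × List (List String)) :=
  -- for key, pats in patterns_dict.items(): bucket (key, pats) by len(pats[0])
  let buckets := patterns_dict.foldl
    (fun d kv =>
      let pats := if 1 < kv.2.length then pvByLenDesc kv.2 else kv.2
      -- len(pats[0]): IndexError on an empty value — excluded by Pre_
      d.modify ((((PySem.List.pyGet? pats 0).getD []).length : Int)) [] (fun l => l ++ [(kv.1, pats)]))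
    (PySem.Dict.empty : PySem.Dict Int (List (String × List (List String))))
  -- result = {}; for n in sorted(buckets, reverse=True): for key, pats in buckets[n]: result[key] = pats
  (List.foldl
    (fun r n => List.foldl (fun r kv => r.insert kv.1 kv.2) r (buckets.getD n []))
    (PySem.Dict.empty : PySem.Dict String (List (List String)))
    (PySem.List.sorted buckets.keys (fun x => x) true)).items

-- ===== PRECONDITION & SPEC =====
-- Pre_ excludes (a) inputs with an empty value list, on which A raises IndexError at patterns_dict[key][0],
-- and (b) association lists with duplicate keys, which do not represent any Python dict argument.
def Pre_sort_large_pattern_first (patterns_dict : List (String × List (List String))) : Prop :=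
  (∀ kv ∈ patterns_dict, kv.2 ≠ []) ∧ (patterns_dict.map Prod.fst).Nodup
instance (patterns_dict : List (String × List (List String))) : Decidable (Pre_sort_large_pattern_first patterns_dict) := by unfold Pre_sort_large_pattern_first; infer_instance

def pvWitness_sort_large_pattern_first : (List (String × List (List String))) :=
  [("a", [["x"], ["yy", "z"]]), ("b", [["www"]])]

def Spec_sort_large_pattern_first (patterns_dict : List (String × List (List String))) (out : List (String × List (List String))) : Prop := out = sort_large_pattern_first_alt patterns_dict
instance (patterns_dict : List (String × List (List String))) (out : List (String × List (List String))) : Decidable (Spec_sort_large_pattern_first patterns_dict out) := by unfold Spec_sort_large_pattern_first; infer_instance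

-- ===== CLAIM (what is proved, stated in full; the proofs are below) =====
def Claim_equal_sort_large_pattern_first : Prop := ∀ (patterns_dict : List (String × List (List String))), Dom_sort_large_pattern_first patterns_dict → Pre_sort_large_pattern_first patterns_dict → Spec_sort_large_pattern_first patterns_dict (sort_large_pattern_first patterns_dict)

-- ===== LEMMAS AND PROOFS =====

-- the per-key value transformation and the length key both programs compute
def pvF (v : List (List String)) : List (List String) :=
  if 1 < v.length then PySem.List.sorted v (fun p => (p.length : Int)) true else v

def pvG (v : List (List String)) : Int :=
  (((PySem.List.pyGet? (pvF v) 0).getD []).length : Int)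

def pvTf (kv : String × List (List String)) : String × List (List String) := (kv.1, pvF kv.2)

def pvLf (kv : String × List (List String)) : String × Int := (kv.1, pvG kv.2)

def pvMKey (p : String × List (List String)) : Int :=
  (((PySem.List.pyGet? p.2 0).getD []).length : Int)

-- ---------- generic bucket-sort = stable descending sort ----------

lemma pv_insertBy_skip {α : Type} (key : α → Int) (x : α) (ys zs : List α)
    (h : ∀ y ∈ ys, ¬ key y < key x) :
    PySem.List.insertBy (fun a b => decide (key b < key a)) x (ys ++ zs)
    = ys ++ PySem.List.insertBy (fun a b => decide (key b < key a)) x zs := by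
  induction ys with
  | nil => simp
  | cons y t ih =>
    have hy : (decide (key y < key x)) = false := by simpa using h y (by simp)
    simp [PySem.List.insertBy, hy, ih (fun z hz => h z (by simp [hz]))]

lemma pv_insertBy_front {α : Type} (key : α → Int) (x : α) (zs : List α)
    (h : ∀ y ∈ zs, key y < key x) :
    PySem.List.insertBy (fun a b => decide (key b < key a)) x zs = x :: zs := by
  cases zs with
  | nil => rfl
  | cons z t => simp [PySem.List.insertBy, h z (by simp)]

lemma pv_ins_mem {α : Type} (key : α → Int) (x : α) (D : List Int) (F : Int → List α)
    (hD : D.Pairwise (fun a b => b < a)) (hmem : key x ∈ D)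
    (hF : ∀ L, ∀ a ∈ F L, key a = L) :
    PySem.List.insertBy (fun a b => decide (key b < key a)) x (D.flatMap F)
    = D.flatMap (fun L => F L ++ if key x == L then [x] else []) := by
  induction D with
  | nil => cases hmem
  | cons L1 Dt ih =>
    rw [List.pairwise_cons] at hD
    obtain ⟨h1, h2⟩ := hD
    by_cases hx : key x = L1
    · have hskip : ∀ y ∈ F L1, ¬ key y < key x := by
        intro y hy
        rw [hF L1 y hy, hx]
        exact lt_irrefl _
      have hfront : ∀ y ∈ Dt.flatMap F, key y < key x := by
        intro y hy
        rcases List.mem_flatMap.mp hy with ⟨L, hL, hyF⟩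
        rw [hF L y hyF, hx]
        exact h1 L hL
      rw [List.flatMap_cons, pv_insertBy_skip key x _ _ hskip, pv_insertBy_front key x _ hfront]
      rw [List.flatMap_cons, if_pos (by simpa using hx)]
      have : Dt.flatMap (fun L => F L ++ if key x == L then [x] else []) = Dt.flatMap F := by
        apply List.flatMap_congr
        intro L hL
        have : key x ≠ L := by rw [hx]; exact fun h => absurd (h ▸ h1 L hL) (lt_irrefl L1)
        simp [this]
      rw [this]
      simp
    · have hmem' : key x ∈ Dt := by
        rcases List.mem_cons.mp hmem with h | h
        · exact absurd h hx
        · exact h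
      have hlt : key x < L1 := h1 _ hmem'
      have hskip : ∀ y ∈ F L1, ¬ key y < key x := by
        intro y hy
        rw [hF L1 y hy]
        exact fun h => absurd (h.trans hlt) (lt_irrefl L1)
      rw [List.flatMap_cons, pv_insertBy_skip key x _ _ hskip, ih h2 hmem']
      rw [List.flatMap_cons, if_neg (by simpa using hx)]
      simp

lemma pv_ins_fresh {α : Type} (key : α → Int) (x : α) (D : List Int) (F : Int → List α)
    (hD : D.Pairwise (fun a b => b < a)) (hmem : key x ∉ D)
    (hF : ∀ L, ∀ a ∈ F L, key a = L) (hFx : F (key x) = []) :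
    PySem.List.insertBy (fun a b => decide (key b < key a)) x (D.flatMap F)
    = (PySem.List.insertBy (fun a b => decide (b < a)) (key x) D).flatMap
        (fun L => F L ++ if key x == L then [x] else []) := by
  induction D with
  | nil => simp [PySem.List.insertBy, hFx]
  | cons L1 Dt ih =>
    rw [List.pairwise_cons] at hD
    obtain ⟨h1, h2⟩ := hD
    have hne : key x ≠ L1 := fun h => hmem (by simp [h])
    by_cases hgt : L1 < key x
    · have hfront : ∀ y ∈ (L1 :: Dt).flatMap F, key y < key x := by
        intro y hy
        rcases List.mem_flatMap.mp hy with ⟨L, hL, hyF⟩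
        rw [hF L y hyF]
        rcases List.mem_cons.mp hL with rfl | hL'
        · exact hgt
        · exact (h1 L hL').trans hgt
      rw [pv_insertBy_front key x _ hfront]
      have hD' : PySem.List.insertBy (fun a b => decide (b < a)) (key x) (L1 :: Dt)
          = key x :: L1 :: Dt := by simp [PySem.List.insertBy, hgt]
      have hcongr : (L1 :: Dt).flatMap (fun L => F L ++ if key x == L then [x] else [])
          = (L1 :: Dt).flatMap F := by
        apply List.flatMap_congr
        intro L hL
        have : key x ≠ L := by
          rcases List.mem_cons.mp hL with rfl | hL'
          · exact hne
          · exact fun h => absurd (h ▸ hgt) (fun hc => absurd (h1 L hL') (not_lt_of_gt hc))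
        simp [this]
      rw [hD']
      conv_rhs => rw [List.flatMap_cons]
      rw [hcongr, hFx]
      simp
    · have hlt : key x < L1 := lt_of_le_of_ne (not_lt.mp hgt) hne
      have hskip : ∀ y ∈ F L1, ¬ key y < key x := by
        intro y hy
        rw [hF L1 y hy]
        exact fun h => absurd (h.trans hlt) (lt_irrefl L1)
      have hD' : PySem.List.insertBy (fun a b => decide (b < a)) (key x) (L1 :: Dt)
          = L1 :: PySem.List.insertBy (fun a b => decide (b < a)) (key x) Dt := by
        simp [PySem.List.insertBy, hgt]
      rw [List.flatMap_cons, pv_insertBy_skip key x _ _ hskip,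
        ih h2 (fun h => hmem (by simp [h])), hD', List.flatMap_cons,
        if_neg (by simpa using hne)]
      simp

lemma pv_sorted_rev_append_singleton {α κ : Type} [LT κ] [DecidableLT κ]
    (m : List α) (k : α → κ) (y : α) :
    PySem.List.sorted (m ++ [y]) k true
    = PySem.List.insertBy (fun a b => decide (k b < k a)) y (PySem.List.sorted m k true) := by
  rw [PySem.List.sorted_rev_eq_foldl_insertBy, PySem.List.sorted_rev_eq_foldl_insertBy,
    List.foldl_append]
  rfl

lemma pv_ofList_append_singleton {α : Type} [BEq α] [LawfulBEq α] (ys : List α) (v : α) :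
    PySem.Set.ofList (ys ++ [v]) = (PySem.Set.ofList ys).add v := by
  show List.foldl PySem.Set.add PySem.Set.empty (ys ++ [v]) = _
  rw [List.foldl_append]
  rfl

-- group-by buckets emitted for the distinct keys in descending order = stable descending sort
lemma pv_bucket_sorted {α : Type} (key : α → Int) (l : List α) :
    PySem.List.sorted l key true
    = (PySem.List.sorted (PySem.Set.ofList (l.map key)) (fun x => x) true).flatMap
        (fun L => l.filter (fun a => key a == L)) := by
  induction l using List.reverseRecOn with
  | nil => rfl
  | append_singleton l x ih =>
    have hDnd : (PySem.List.sorted (PySem.Set.ofList (l.map key)) (fun x => x) true).Nodup :=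
      ((PySem.List.sorted_perm _ _ _).nodup_iff).mpr (PySem.Set.nodup_ofList _)
    have hDpw : (PySem.List.sorted (PySem.Set.ofList (l.map key)) (fun x => x) true).Pairwise
        (fun a b => b < a) := by
      have hle := PySem.List.sorted_pairwise_rev (PySem.Set.ofList (l.map key)) (fun x : Int => x)
      exact (hle.and hDnd).imp (fun h => lt_of_le_of_ne h.1 (Ne.symm h.2))
    have hDmem : ∀ L, L ∈ PySem.List.sorted (PySem.Set.ofList (l.map key)) (fun x => x) true
        ↔ L ∈ l.map key := by
      intro L
      rw [(PySem.List.sorted_perm _ _ _).mem_iff, PySem.Set.mem_ofList]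
    have hF : ∀ L : Int, ∀ a ∈ l.filter (fun a => key a == L), key a = L := by
      intro L a ha
      exact by simpa using List.of_mem_filter ha
    have hfilt : ∀ L : Int, (l ++ [x]).filter (fun a => key a == L)
        = l.filter (fun a => key a == L) ++ if key x == L then [x] else [] := by
      intro L
      rw [List.filter_append]
      congr 1
      cases h : (key x == L) <;> simp [List.filter, h]
    rw [pv_sorted_rev_append_singleton, ih, List.map_append, List.map_cons, List.map_nil,
      pv_ofList_append_singleton]
    by_cases hx : key x ∈ l.map key
    · have hcont : (PySem.Set.ofList (l.map key)).add (key x) = PySem.Set.ofList (l.map key) := by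
        have hm : key x ∈ PySem.Set.ofList (l.map key) := (PySem.Set.mem_ofList _ _).mpr hx
        simp [PySem.Set.add, hm]
      rw [hcont, pv_ins_mem key x _ _ hDpw ((hDmem _).mpr hx) hF]
      exact List.flatMap_congr (fun L _ => (hfilt L).symm)
    · have hcont : (PySem.Set.ofList (l.map key)).add (key x)
          = PySem.Set.ofList (l.map key) ++ [key x] := by
        have hm : key x ∉ PySem.Set.ofList (l.map key) :=
          fun h => hx ((PySem.Set.mem_ofList _ _).mp h)
        simp [PySem.Set.add, hm]
      have hFx : l.filter (fun a => key a == key x) = [] := by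
        rw [List.filter_eq_nil_iff]
        intro a ha
        simp only [beq_iff_eq]
        exact fun h => hx (List.mem_map.mpr ⟨a, ha, h⟩)
      rw [hcont, pv_sorted_rev_append_singleton,
        pv_ins_fresh key x _ _ hDpw (fun h => hx ((hDmem _).mp h)) hF hFx]
      exact List.flatMap_congr (fun L _ => (hfilt L).symm)

-- ---------- B's helper is the descending length sort ----------

lemma pv_byLenDesc_eq (seq : List (List String)) :
    pvByLenDesc seq = PySem.List.sorted seq (fun p => (p.length : Int)) true := by
  have hkeys : (seq.foldl (fun d x => d.modify ((x.length : Int)) [] (fun l => l ++ [x]))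
      (PySem.Dict.empty : PySem.Dict Int (List (List String)))).keys
      = PySem.Set.ofList (seq.map (fun x => (x.length : Int))) := by
    rw [PySem.Dict.keys_foldl_modify_key seq (fun x => ((x.length : Int))) []
      (fun _ x => fun l => l ++ [x]) PySem.Dict.empty]
    rfl
  have hgetD : ∀ n : Int, (seq.foldl (fun d x => d.modify ((x.length : Int)) [] (fun l => l ++ [x]))
      (PySem.Dict.empty : PySem.Dict Int (List (List String)))).getD n []
      = seq.filter (fun x => ((x.length : Int)) == n) := by
    intro n
    rw [show List.foldl (fun (d : PySem.Dict Int (List (List String))) (x : List String) =>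
          d.modify ((x.length : Int)) [] (fun l => l ++ [x])) PySem.Dict.empty seq
        = List.foldl (fun d p => d.modify p.1 [] (fun l => l ++ [p.2])) PySem.Dict.empty
            (seq.map (fun x : List String => (((x.length : Int)), x))) from by
      rw [List.foldl_map]]
    rw [PySem.Dict.getD_foldl_modify_append, List.filter_map, List.map_map,
      show ((fun x : Int × List String => x.2) ∘ fun x : List String => (((x.length : Int)), x))
        = id from rfl, List.map_id]
    rfl
  simp only [pvByLenDesc]
  rw [hkeys]
  rw [PySem.List.foldl_append_eq_flatMap (fun n =>
    (seq.foldl (fun d x => d.modify ((x.length : Int)) [] (fun l => l ++ [x]))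
      (PySem.Dict.empty : PySem.Dict Int (List (List String)))).getD n [])]
  rw [List.nil_append, List.flatMap_congr (fun n _ => hgetD n)]
  exact (pv_bucket_sorted (fun p : List String => (p.length : Int)) seq).symm

-- ---------- shared A-side machinery ----------

lemma pv_sorted_rev_map {α β κ : Type} [LT κ] [DecidableLT κ]
    (m : α → β) (key : β → κ) (l : List α) :
    PySem.List.sorted (l.map m) key true =
      (PySem.List.sorted l (fun a => key (m a)) true).map m := by
  induction l using List.reverseRecOn with
  | nil => rfl
  | append_singleton l x ih =>
    rw [List.map_append, List.map_singleton, pv_sorted_rev_append_singleton,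
      pv_sorted_rev_append_singleton, ih]
    generalize PySem.List.sorted l (fun a => key (m a)) true = ys
    induction ys with
    | nil => simp [PySem.List.insertBy]
    | cons y t ihy =>
      simp only [List.map_cons, PySem.List.insertBy]
      split <;> simp [ihy]

lemma pv_getD_mk {l : List (String × List (List String))} {k : String} {v : List (List String)}
    (hmem : (k, v) ∈ l) (hnd : (l.map Prod.fst).Nodup) (d0 : List (List String)) :
    (PySem.Dict.mk l).getD k d0 = v := by
  apply PySem.Dict.getD_of_mem_items (PySem.Dict.mk l) hmem
  simpa [PySem.Dict.keys_mk] using hnd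

lemma pv_contains_mk {ν : Type} (l : List (String × ν)) (k : String) :
    (PySem.Dict.mk l).contains k = l.any (fun p => p.1 == k) := rfl

-- the first loop of A: transforms every value with pvF and records pvG, key by key
lemma pv_loop1 (s p : List (String × List (List String)))
    (hnd : ((p ++ s).map Prod.fst).Nodup) :
    List.foldl
      (fun (st : PySem.Dict String (List (List String)) × PySem.Dict String Int) key =>
        (if 1 < (st.1.getD key []).length
           then st.1.insert key (PySem.List.sorted (st.1.getD key []) (fun p => (p.length : Int)) true)
           else st.1,
         st.2.insert key
           ((((PySem.List.pyGet?
             ((if 1 < (st.1.getD key []).length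
                 then st.1.insert key (PySem.List.sorted (st.1.getD key []) (fun p => (p.length : Int)) true)
                 else st.1).getD key []) 0).getD []).length : Int))))
      (PySem.Dict.mk (p.map pvTf ++ s), PySem.Dict.mk (p.map pvLf))
      (s.map Prod.fst)
    = (PySem.Dict.mk ((p ++ s).map pvTf), PySem.Dict.mk ((p ++ s).map pvLf)) := by
  induction s generalizing p with
  | nil => simp
  | cons kv s' ih =>
    obtain ⟨k, v⟩ := kv
    have hnd2 : ((p.map Prod.fst) ++ (k :: s'.map Prod.fst)).Nodup := by
      have h := hnd
      simp only [List.map_append, List.map_cons] at h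
      exact h
    have hknp : k ∉ p.map Prod.fst := by
      intro hk
      exact (List.nodup_append.mp hnd2).2.2 k hk k (by simp) rfl
    have hkns' : k ∉ s'.map Prod.fst :=
      (List.nodup_cons.mp (List.nodup_append.mp hnd2).2.1).1
    have hkp : ∀ q ∈ p, q.1 ≠ k := fun q hq hqk => hknp (List.mem_map.mpr ⟨q, hq, hqk⟩)
    have hks' : ∀ q ∈ s', q.1 ≠ k := fun q hq hqk => hkns' (List.mem_map.mpr ⟨q, hq, hqk⟩)
    have hndn : ((p.map pvTf ++ (k, v) :: s').map Prod.fst).Nodup := by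
      have he : (p.map pvTf ++ (k, v) :: s').map Prod.fst = (p ++ (k, v) :: s').map Prod.fst := by
        simp [List.map_append, List.map_map, pvTf, Function.comp]
      rw [he]; exact hnd
    have hmem : (k, v) ∈ p.map pvTf ++ (k, v) :: s' := by simp
    have hget1 : (PySem.Dict.mk (p.map pvTf ++ (k, v) :: s')).getD k [] = v :=
      pv_getD_mk hmem hndn []
    have hstep :
        (if 1 < ((PySem.Dict.mk (p.map pvTf ++ (k, v) :: s')).getD k []).length
         then (PySem.Dict.mk (p.map pvTf ++ (k, v) :: s')).insert k
           (PySem.List.sorted ((PySem.Dict.mk (p.map pvTf ++ (k, v) :: s')).getD k []) (fun p => (p.length : Int)) true)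
         else PySem.Dict.mk (p.map pvTf ++ (k, v) :: s'))
        = PySem.Dict.mk (p.map pvTf ++ (k, pvF v) :: s') := by
      rw [hget1]
      by_cases hv : 1 < v.length
      · rw [if_pos hv]
        apply PySem.Dict.ext
        rw [PySem.Dict.items_insert_of_contains _ _ (by
          rw [pv_contains_mk]; exact List.any_eq_true.mpr ⟨(k, v), hmem, by simp⟩)]
        show List.map _ (p.map pvTf ++ (k, v) :: s') = p.map pvTf ++ (k, pvF v) :: s'
        rw [List.map_append, List.map_cons]
        congr 1
        · rw [List.map_map]
          apply List.map_congr_left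
          intro q hq
          simp [pvTf, Function.comp, hkp q hq]
        · congr 1
          · simp [pvF, hv]
          · have hse : ∀ q ∈ s',
                (fun p => if (p.1 == k) = true then (k, PySem.List.sorted v (fun p => (p.length : Int)) true) else p) q = q := by
              intro q hq; simp [hks' q hq]
            simpa using List.map_congr_left hse
      · rw [if_neg hv]
        have he : pvF v = v := by simp [pvF, hv]
        rw [he]
    have hndn2 : ((p.map pvTf ++ (k, pvF v) :: s').map Prod.fst).Nodup := by
      have he : (p.map pvTf ++ (k, pvF v) :: s').map Prod.fst = (p ++ (k, v) :: s').map Prod.fst := by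
        simp [List.map_append, List.map_map, pvTf, Function.comp]
      rw [he]; exact hnd
    have hget2 : (PySem.Dict.mk (p.map pvTf ++ (k, pvF v) :: s')).getD k [] = pvF v :=
      pv_getD_mk (by simp) hndn2 []
    have hld : (PySem.Dict.mk (p.map pvLf : List (String × Int))).insert k (pvG v)
        = PySem.Dict.mk (p.map pvLf ++ [(k, pvG v)]) := by
      apply PySem.Dict.ext
      rw [PySem.Dict.items_insert_of_not_contains _ _ (by
        rw [pv_contains_mk]
        simp only [List.any_eq_false]
        intro q hq
        rcases List.mem_map.mp hq with ⟨q0, hq0, rfl⟩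
        simpa [pvLf] using hkp q0 hq0)]
    have hstate :
        ((fun (st : PySem.Dict String (List (List String)) × PySem.Dict String Int) key =>
          (if 1 < (st.1.getD key []).length
             then st.1.insert key (PySem.List.sorted (st.1.getD key []) (fun p => (p.length : Int)) true)
             else st.1,
           st.2.insert key
             ((((PySem.List.pyGet?
               ((if 1 < (st.1.getD key []).length
                   then st.1.insert key (PySem.List.sorted (st.1.getD key []) (fun p => (p.length : Int)) true)
                   else st.1).getD key []) 0).getD []).length : Int))))
          (PySem.Dict.mk (p.map pvTf ++ (k, v) :: s'), PySem.Dict.mk (p.map pvLf)) k)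
        = (PySem.Dict.mk (p.map pvTf ++ (k, pvF v) :: s'), PySem.Dict.mk (p.map pvLf ++ [(k, pvG v)])) := by
      show (_, _) = _
      rw [hstep, hget2]
      have hld' : (PySem.Dict.mk (p.map pvLf)).insert k
          ((((PySem.List.pyGet? (pvF v) 0).getD []).length : Int))
          = PySem.Dict.mk (p.map pvLf ++ [(k, pvG v)]) := hld
      rw [hld']
    rw [List.map_cons, List.foldl_cons]
    have hnd3 : (((p ++ [(k, v)]) ++ s').map Prod.fst).Nodup := by
      simpa [List.append_assoc] using hnd
    have hstart : (PySem.Dict.mk (p.map pvTf ++ (k, pvF v) :: s'),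
        PySem.Dict.mk (p.map pvLf ++ [(k, pvG v)]))
        = (PySem.Dict.mk ((p ++ [(k, v)]).map pvTf ++ s'),
           PySem.Dict.mk ((p ++ [(k, v)]).map pvLf)) := by
      simp [pvTf, pvLf]
    have hres : (PySem.Dict.mk (((p ++ [(k, v)]) ++ s').map pvTf),
        PySem.Dict.mk (((p ++ [(k, v)]) ++ s').map pvLf))
        = (PySem.Dict.mk ((p ++ (k, v) :: s').map pvTf),
           PySem.Dict.mk ((p ++ (k, v) :: s').map pvLf)) := by
      simp [List.append_assoc]
    exact (congrArg (fun st => List.foldl _ st (s'.map Prod.fst))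
      (hstate.trans hstart)).trans ((ih (p ++ [(k, v)]) hnd3).trans hres)

-- a dict built from a nodup-key pair list keeps exactly that list as items
lemma pv_items_ofList {ν : Type} (l : List (String × ν)) (hnd : (l.map Prod.fst).Nodup) :
    (PySem.Dict.ofList l).items = l := by
  have h := PySem.Dict.items_foldl_insert_fresh l (fun p => p.1) (fun p => p.2)
    (PySem.Dict.empty) (by intro a _; rfl) (hnd)
  simpa using h

-- A's result, characterised: the stably descending-sorted transformed items
lemma pv_A_eq (pd : List (String × List (List String))) (hnd : (pd.map Prod.fst).Nodup) :
    sort_large_pattern_first pd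
    = (PySem.List.sorted pd (fun kv => pvG kv.2) true).map pvTf := by
  unfold sort_large_pattern_first
  simp only [PySem.Dict.keys_mk]
  have hloop := pv_loop1 pd [] (by simpa using hnd)
  rw [show (PySem.Dict.mk pd, (PySem.Dict.empty : PySem.Dict String Int))
      = (PySem.Dict.mk (([] : List (String × List (List String))).map pvTf ++ pd),
         PySem.Dict.mk (([] : List (String × List (List String))).map pvLf)) from rfl]
  rw [show pd.map (fun x => x.1) = pd.map Prod.fst from rfl, hloop]
  simp only [List.nil_append]
  have hSmap : PySem.List.sorted ((PySem.Dict.mk (pd.map pvLf)).items) (fun it => it.2) true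
      = (PySem.List.sorted pd (fun kv => pvG kv.2) true).map pvLf := by
    show PySem.List.sorted (pd.map pvLf) (fun it => it.2) true = _
    exact pv_sorted_rev_map pvLf (fun it => it.2) pd
  set S := PySem.List.sorted pd (fun kv => pvG kv.2) true with hS
  have hSperm : S.Perm pd := PySem.List.sorted_perm pd _ true
  have hSnd : (S.map Prod.fst).Nodup := ((hSperm.map Prod.fst).nodup_iff).mpr hnd
  have hSlfnd : ((S.map pvLf).map Prod.fst).Nodup := by
    have : (S.map pvLf).map Prod.fst = S.map Prod.fst := by
      simp [List.map_map, pvLf, Function.comp]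
    rw [this]; exact hSnd
  rw [hSmap]
  have hkeys : (PySem.Dict.ofList (S.map pvLf)).keys = S.map Prod.fst := by
    show ((PySem.Dict.ofList (S.map pvLf)).items).map (fun x => x.1) = _
    rw [pv_items_ofList _ hSlfnd]
    simp [List.map_map, pvLf, Function.comp]
  rw [hkeys]
  rw [List.foldl_map]
  have hrebuild := PySem.Dict.items_foldl_insert_fresh S (fun kv => kv.1)
    (fun kv => (PySem.Dict.mk (pd.map pvTf)).getD kv.1 []) PySem.Dict.empty
    (by intro a _; rfl) hSnd
  rw [hrebuild]
  simp only [PySem.Dict.empty, List.nil_append]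
  apply List.map_congr_left
  intro kv hkv
  have hkvpd : kv ∈ pd := hSperm.mem_iff.mp hkv
  have : (PySem.Dict.mk (pd.map pvTf)).getD kv.1 [] = pvF kv.2 := by
    apply pv_getD_mk (List.mem_map.mpr ⟨kv, hkvpd, rfl⟩)
    have : (pd.map pvTf).map Prod.fst = pd.map Prod.fst := by
      simp [List.map_map, pvTf, Function.comp]
    rw [this]; exact hnd
  rw [this]
  rfl

-- folding the inserts bucket by bucket is folding over the concatenated buckets
lemma pv_foldl_foldl {γ δ : Type} (f : γ → δ → γ) (g : Int → List δ) (D : List Int) (e : γ) :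
    List.foldl (fun r n => List.foldl f r (g n)) e D = List.foldl f e (D.flatMap g) := by
  induction D generalizing e with
  | nil => rfl
  | cons n t ih => simp [List.flatMap_cons, List.foldl_append, ih]

-- B's result, characterised: the same list
lemma pv_B_eq (pd : List (String × List (List String))) (hnd : (pd.map Prod.fst).Nodup) :
    sort_large_pattern_first_alt pd
    = (PySem.List.sorted pd (fun kv => pvG kv.2) true).map pvTf := by
  simp only [sort_large_pattern_first_alt]
  -- the bucket-filling fold computes (pvG kv.2)-keyed buckets of pvTf kv
  rw [show (fun (d : PySem.Dict Int (List (String × List (List String))))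
        (kv : String × List (List String)) =>
        d.modify ((((PySem.List.pyGet? (if 1 < kv.2.length then pvByLenDesc kv.2 else kv.2) 0).getD
          []).length : Int)) [] (fun l => l ++ [(kv.1, if 1 < kv.2.length then pvByLenDesc kv.2 else kv.2)]))
      = (fun d kv => d.modify (pvG kv.2) [] (fun l => l ++ [pvTf kv])) from by
    funext d kv
    rw [show (if 1 < kv.2.length then pvByLenDesc kv.2 else kv.2) = pvF kv.2 from by
      unfold pvF
      split
      · exact pv_byLenDesc_eq kv.2
      · rfl]
    rfl]
  have hkeys : (pd.foldl (fun d kv => d.modify (pvG kv.2) [] (fun l => l ++ [pvTf kv]))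
      (PySem.Dict.empty : PySem.Dict Int (List (String × List (List String))))).keys
      = PySem.Set.ofList (pd.map (fun kv => pvG kv.2)) := by
    rw [PySem.Dict.keys_foldl_modify_key pd (fun kv => pvG kv.2) []
      (fun _ kv => fun l => l ++ [pvTf kv]) PySem.Dict.empty]
    rfl
  have hgetD : ∀ n : Int, (pd.foldl (fun d kv => d.modify (pvG kv.2) [] (fun l => l ++ [pvTf kv]))
      (PySem.Dict.empty : PySem.Dict Int (List (String × List (List String))))).getD n []
      = (pd.map pvTf).filter (fun p => pvMKey p == n) := by
    intro n
    rw [show List.foldl (fun (d : PySem.Dict Int (List (String × List (List String))))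
          (kv : String × List (List String)) => d.modify (pvG kv.2) [] (fun l => l ++ [pvTf kv]))
          PySem.Dict.empty pd
        = List.foldl (fun d p => d.modify p.1 [] (fun l => l ++ [p.2])) PySem.Dict.empty
            (pd.map (fun kv : String × List (List String) => (pvG kv.2, pvTf kv))) from by
      rw [List.foldl_map]]
    rw [PySem.Dict.getD_foldl_modify_append, List.filter_map, List.map_map,
      show List.filter (fun p => pvMKey p == n) (List.map pvTf pd)
        = List.map pvTf (List.filter ((fun p : String × List (List String) => pvMKey p == n) ∘ pvTf) pd)
        from List.filter_map]
    rfl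
  rw [hkeys]
  simp only [hgetD]
  rw [pv_foldl_foldl]
  -- the flattened bucket output is the stable descending sort of the transformed items
  have hbig : (PySem.List.sorted (PySem.Set.ofList (pd.map (fun kv => pvG kv.2))) (fun x => x) true).flatMap
      (fun n => (pd.map pvTf).filter (fun p => pvMKey p == n))
      = (PySem.List.sorted pd (fun kv => pvG kv.2) true).map pvTf := by
    have hmapkey : (pd.map pvTf).map pvMKey = pd.map (fun kv => pvG kv.2) := by
      rw [List.map_map]; rfl
    rw [← hmapkey, ← pv_bucket_sorted pvMKey (pd.map pvTf)]
    exact pv_sorted_rev_map pvTf pvMKey pd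
  rw [hbig]
  set S := PySem.List.sorted pd (fun kv => pvG kv.2) true with hS
  have hSperm : S.Perm pd := PySem.List.sorted_perm pd _ true
  have hSnd : (S.map Prod.fst).Nodup := ((hSperm.map Prod.fst).nodup_iff).mpr hnd
  have hTfnd : ((S.map pvTf).map Prod.fst).Nodup := by
    have : (S.map pvTf).map Prod.fst = S.map Prod.fst := by
      simp [List.map_map, pvTf, Function.comp]
    rw [this]; exact hSnd
  have hitems := PySem.Dict.items_foldl_insert_fresh (S.map pvTf) (fun kv => kv.1)
    (fun kv => kv.2) (PySem.Dict.empty : PySem.Dict String (List (List String)))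
    (by intro a _; exact PySem.Dict.contains_empty _) hTfnd
  rw [hitems, show (fun a : String × List (List String) =>
      ((fun kv : String × List (List String) => kv.1) a,
       (fun kv : String × List (List String) => kv.2) a)) = id from rfl, List.map_id]
  rfl

-- ===== VERDICT (by name: the statement is the Claim_ definition above) =====
theorem sort_large_pattern_first_spec : Claim_equal_sort_large_pattern_first := by
  intro pd _ hpre
  obtain ⟨-, hnd⟩ := hpre
  show sort_large_pattern_first pd = sort_large_pattern_first_alt pd
  rw [pv_A_eq pd hnd, pv_B_eq pd hnd]
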